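-- pv_equiv track=rewrite | github.com/mobsung/ITS_Esercizi | Code_wars/game_of_life.py | strip_empty
-- ===== SOURCE A (Python) =====
-- def strip_empty(cells: list[list[int]]) -> list[list[int]]:
--
--
--     inverted = list(zip(*cells))
--
--     inverted = [col for col in inverted if any(cell == 1 for cell in col)]
--
--     cells = [list(row) for row in zip(*inverted)]
--
--     cells = [row for row in cells if any(cell == 1 for cell in row)]
--
--     if not cells:
--         return []
--
--     return cells
-- ===== SOURCE B (Python) =====
-- def strip_empty(cells: list[list[int]]) -> list[list[int]]:
--     if not cells:
--         return []
--     min_len = min(len(r) for r in cells)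
--     live_cols = [c for c in range(min_len)
--                  if any(row[c] == 1 for row in cells)]
--     return [[row[c] for c in live_cols]
--             for row in cells
--             if any(row[c] == 1 for c in range(min_len))]
-- ===== Notes on version B (the rewrite author's own statement) =====
-- stated objective: simpler
-- what changed: Replaces the two zip-transposes and intermediate column lists by a single scan computing live column indices plus one projecting/filtering pass over the original rows.
import Mathlib
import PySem

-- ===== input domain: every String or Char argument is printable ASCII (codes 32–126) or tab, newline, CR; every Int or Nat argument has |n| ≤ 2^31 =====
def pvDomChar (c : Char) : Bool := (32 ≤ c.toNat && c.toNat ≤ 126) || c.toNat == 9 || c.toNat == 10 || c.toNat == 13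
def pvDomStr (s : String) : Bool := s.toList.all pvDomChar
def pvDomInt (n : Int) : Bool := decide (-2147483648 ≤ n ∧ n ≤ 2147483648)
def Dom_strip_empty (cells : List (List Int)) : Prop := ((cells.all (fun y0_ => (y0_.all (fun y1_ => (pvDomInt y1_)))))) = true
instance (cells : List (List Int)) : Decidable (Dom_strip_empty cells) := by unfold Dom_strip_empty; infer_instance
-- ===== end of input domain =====

-- B strips all-zero rows/columns with one live-column index scan and one projecting pass,
-- instead of A's transpose / filter / transpose-back; same value on every input (A is total).

-- Python's zip(*rows) truncates to the shortest row; shared helper computing that length.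
def minRowLen (rows : List (List Int)) : Nat :=
  match rows with
  | [] => 0
  | r :: rs => rs.foldl (fun m r => min m r.length) r.length

-- ===== PORT A =====
-- model of list(zip(*rows)) (tuples rendered as lists)
def pyZip (rows : List (List Int)) : List (List Int) :=
  (List.range (minRowLen rows)).map (fun c => rows.map (fun r => r.getD c 0))

def strip_empty (cells : List (List Int)) : List (List Int) :=
  let inverted := pyZip cells
  let inverted := inverted.filter (fun col => col.any (fun cell => cell == 1))
  let cells2 := (pyZip inverted).map (fun row => row)   -- list(row) is the identity here
  let cells3 := cells2.filter (fun row => row.any (fun cell => cell == 1))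
  if cells3.isEmpty then [] else cells3

-- ===== PORT B =====
def strip_empty_alt (cells : List (List Int)) : List (List Int) :=
  if cells.isEmpty then []
  else
    let minLen := minRowLen cells
    let liveCols := (List.range minLen).filter (fun c => cells.any (fun row => row.getD c 0 == 1))
    (cells.filter (fun row => (List.range minLen).any (fun c => row.getD c 0 == 1))).map
      (fun row => liveCols.map (fun c => row.getD c 0))

-- ===== PRECONDITION & SPEC =====
def Spec_strip_empty (cells : List (List Int)) (out : List (List Int)) : Prop := out = strip_empty_alt cells
instance (cells : List (List Int)) (out : List (List Int)) : Decidable (Spec_strip_empty cells out) := by unfold Spec_strip_empty; infer_instance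

-- ===== CLAIM (what is proved, stated in full; the proofs are below) =====
def Claim_equal_strip_empty : Prop := ∀ (cells : List (List Int)), Dom_strip_empty cells → Spec_strip_empty cells (strip_empty cells)

-- ===== LEMMAS AND PROOFS =====

theorem pv_any_congr_mem {α : Type} (p q : α → Bool) :
    ∀ (l : List α), (∀ x ∈ l, p x = q x) → l.any p = l.any q := by
  intro l h
  induction l with
  | nil => rfl
  | cons a t ih =>
    simp only [List.any_cons, h a (by simp), ih (fun x hx => h x (by simp [hx]))]

theorem pv_foldl_min_len (n : Nat) :
    ∀ (xs : List (List Int)), (∀ r ∈ xs, r.length = n) →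
      xs.foldl (fun m r => min m r.length) n = n := by
  intro xs h
  induction xs with
  | nil => rfl
  | cons a t ih =>
    simp only [List.foldl_cons, h a (by simp), min_self]
    exact ih (fun r hr => h r (by simp [hr]))

theorem pv_minRowLen_all (n : Nat) (l : List (List Int)) (hne : l ≠ [])
    (h : ∀ r ∈ l, r.length = n) : minRowLen l = n := by
  cases l with
  | nil => exact absurd rfl hne
  | cons a t =>
    simp only [minRowLen, h a (by simp)]
    exact pv_foldl_min_len n t (fun r hr => h r (by simp [hr]))

theorem strip_empty_eq_alt (cells : List (List Int)) :
    strip_empty cells = strip_empty_alt cells := by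
  cases cells with
  | nil => rfl
  | cons r rs =>
    set cs : List (List Int) := r :: rs with hcs
    have hne : cs ≠ [] := by simp [hcs]
    set m := minRowLen cs with hm
    set live : Nat → Bool := fun c => cs.any (fun row => row.getD c 0 == 1) with hlive
    set colAt : Nat → List Int := fun c => cs.map (fun r => r.getD c 0) with hcolAt
    set liveCols := (List.range m).filter live with hliveCols
    set proj : List Int → List Int := fun row => liveCols.map (fun c => row.getD c 0) with hproj
    -- step 1: the filtered transpose is the live columns
    have h1 : (pyZip cs).filter (fun col => col.any (fun cell => cell == 1))
        = liveCols.map colAt := by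
      rw [pyZip, List.filter_map]
      congr 1
      apply List.filter_congr
      intro c _
      simp [hlive, List.any_map, Function.comp_def]
    -- step 2: pointwise, a projected row is live iff the row has a 1 below m
    have hrowpred : ∀ row ∈ cs,
        ((proj row).any (fun cell => cell == 1))
          = ((List.range m).any (fun c => row.getD c 0 == 1)) := by
      intro row hrow
      rw [hproj]
      simp only [List.any_map]
      rw [hliveCols, List.any_filter]
      apply pv_any_congr_mem
      intro c _
      by_cases hq : row.getD c 0 = 1
      · rw [List.getD_eq_getElem?_getD] at hq
        have hl : live c = true := by
          rw [hlive]; exact List.any_eq_true.2 ⟨row, hrow, by simp [hq]⟩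
        simp [hq, hl]
      · rw [List.getD_eq_getElem?_getD] at hq
        simp [hq]
    by_cases hLC : liveCols = []
    · -- no live column: both sides are []
      have hA : strip_empty cs = [] := by
        simp only [strip_empty, h1, hLC, List.map_nil]
        rfl
      have hB : strip_empty_alt cs = [] := by
        have hfil : cs.filter (fun row => (List.range (minRowLen cs)).any (fun c => row.getD c 0 == 1)) = [] := by
          apply List.filter_eq_nil_iff.2
          intro row hrow hp
          rcases List.any_eq_true.1 hp with ⟨c, hc, hq⟩
          have hl : live c = true := by
            rw [hlive]; exact List.any_eq_true.2 ⟨row, hrow, hq⟩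
          have hmem : c ∈ liveCols := by
            rw [hliveCols]; exact List.mem_filter.2 ⟨by rw [hm]; exact hc, hl⟩
          rw [hLC] at hmem
          simp at hmem
        simp only [strip_empty_alt, if_neg (by simp [hcs] : ¬ cs.isEmpty = true), hfil, List.map_nil]
      rw [hA, hB]
    · -- live columns exist: second transpose = projection of every row
      have hcolLen : ∀ col ∈ liveCols.map colAt, col.length = cs.length := by
        intro col hcol
        rcases List.mem_map.1 hcol with ⟨c, _, rfl⟩
        simp [hcolAt]
      have hmin2 : minRowLen (liveCols.map colAt) = cs.length :=
        pv_minRowLen_all cs.length _ (by simpa using hLC) hcolLen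
      have h2 : pyZip (liveCols.map colAt) = cs.map proj := by
        rw [pyZip, hmin2]
        apply List.ext_getElem (by simp)
        intro i h₁ h₂
        simp only [List.getElem_map, List.getElem_range, List.map_map, hproj]
        apply List.map_congr_left
        intro c _
        have hlen : i < (colAt c).length := by
          simpa [hcolAt] using (by simpa using h₁)
        rw [Function.comp_apply, List.getD_eq_getElem _ _ hlen]
        simp [hcolAt]
      have hA : strip_empty cs
          = ((cs.map proj).filter (fun row => row.any (fun cell => cell == 1))) := by
        simp only [strip_empty, h1, h2, List.map_id']
        split
        · next hemp => exact (List.isEmpty_iff.mp hemp).symm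
        · rfl
      rw [hA, List.filter_map, strip_empty_alt,
          if_neg (by simp [hcs] : ¬ cs.isEmpty = true)]
      simp only [← hm, ← hlive, ← hliveCols]
      congr 1
      apply List.filter_congr
      intro row hrow
      simpa [Function.comp] using hrowpred row hrow

-- ===== VERDICT (by name: the statement is the Claim_ definition above) =====
theorem strip_empty_spec : Claim_equal_strip_empty := by
  intro cells _
  exact strip_empty_eq_alt cells
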